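-- pv_equiv track=rewrite | github.com/StevenXoFk/Tarea-taller-Tkinter | convertidor.py | base6_a_base5
-- ===== SOURCE A (Python) =====
-- def base6_a_base5(numero):
--     decimal = 0
--     exponente = 0
--
--     while numero > 0:
--         digitos = numero % 10
--         decimal += digitos * (6 ** exponente)
--         numero //= 10
--         exponente += 1
--
--     binario = 0
--     valor = 1
--     while decimal > 0:
--         todo = decimal % 5
--         binario += todo * valor
--         decimal //= 5
--         valor *= 10
--
--     return binario
-- ===== SOURCE B (Python) =====
-- def base6_a_base5(numero):
--     if numero <= 0:
--         return 0
--     # decode: read the decimal digit string MSB-first with Horner's rule in base 6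
--     decimal = 0
--     for ch in str(numero):
--         decimal = decimal * 6 + int(ch)
--     # encode: collect base-5 digits LSB-first, then rebuild the integer MSB-first
--     digits = []
--     while decimal > 0:
--         digits.append(decimal % 5)
--         decimal //= 5
--     result = 0
--     for d in reversed(digits):
--         result = result * 10 + d
--     return result
-- ===== Notes on version B (the rewrite author's own statement) =====
-- stated objective: alternative
-- what changed: B guards numero <= 0, decodes via Horner's rule over the decimal digit string MSB-first (instead of LSB-first %10 power accumulation), and encodes by collecting base-5 digits into a list and rebuilding the integer from the reversed list (instead of a running power-of-10 accumulator).
import Mathlib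
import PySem

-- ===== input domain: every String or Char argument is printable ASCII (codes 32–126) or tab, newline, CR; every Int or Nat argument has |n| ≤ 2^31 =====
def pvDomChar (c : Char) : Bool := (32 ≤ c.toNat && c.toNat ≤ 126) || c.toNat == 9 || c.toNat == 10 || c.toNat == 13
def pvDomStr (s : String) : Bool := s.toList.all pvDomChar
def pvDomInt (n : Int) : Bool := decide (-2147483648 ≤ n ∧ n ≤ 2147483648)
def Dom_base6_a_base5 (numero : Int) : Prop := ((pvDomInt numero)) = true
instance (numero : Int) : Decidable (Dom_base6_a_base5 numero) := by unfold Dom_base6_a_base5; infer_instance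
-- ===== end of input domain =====

-- B decodes via Horner over the decimal digit string MSB-first and encodes via a base-5 digit
-- list rebuilt in reverse, instead of A's two LSB-first power accumulators (alternative decomposition).


-- ===== PORT A =====
-- first while loop of A: decimal += (numero % 10) * 6 ** exponente; numero //= 10
def aDecode (numero decimal : Int) (exponente : Nat) : Int :=
  if numero > 0 then
    aDecode (PySem.Int.floordiv numero 10)
      (decimal + PySem.Int.mod numero 10 * 6 ^ exponente) (exponente + 1)
  else decimal
termination_by numero.toNat
decreasing_by
  rw [PySem.Int.floordiv_eq_ediv_of_pos (by norm_num)]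
  omega

-- second while loop of A: binario += (decimal % 5) * valor; decimal //= 5; valor *= 10
def aEncode (decimal binario valor : Int) : Int :=
  if decimal > 0 then
    aEncode (PySem.Int.floordiv decimal 5) (binario + PySem.Int.mod decimal 5 * valor) (valor * 10)
  else binario
termination_by decimal.toNat
decreasing_by
  rw [PySem.Int.floordiv_eq_ediv_of_pos (by norm_num)]
  omega

def base6_a_base5 (numero : Int) : Int :=
  aEncode (aDecode numero 0 0) 0 1

-- ===== PORT B =====
-- Source B's while loop: digits.append(decimal % 5); decimal //= 5  (LSB-first list)
def bDigits (decimal : Int) : List Int :=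
  if decimal > 0 then PySem.Int.mod decimal 5 :: bDigits (PySem.Int.floordiv decimal 5) else []
termination_by decimal.toNat
decreasing_by
  rw [PySem.Int.floordiv_eq_ediv_of_pos (by norm_num)]
  omega

def base6_a_base5_alt (numero : Int) : Int :=
  if numero ≤ 0 then 0
  else
    -- for ch in str(numero): decimal = decimal * 6 + int(ch)
    -- int(ch) ported as ch.toNat - 48: exact for the digit characters str(numero) produces
    let decimal :=
      (PySem.Int.toStr numero).toList.foldl (fun a c => a * 6 + ((c.toNat : Int) - 48)) 0
    -- for d in reversed(digits): result = result * 10 + d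
    (bDigits decimal).reverse.foldl (fun r d => r * 10 + d) 0

-- ===== PRECONDITION & SPEC =====
def Spec_base6_a_base5 (numero : Int) (out : Int) : Prop := out = base6_a_base5_alt numero
instance (numero : Int) (out : Int) : Decidable (Spec_base6_a_base5 numero out) := by unfold Spec_base6_a_base5; infer_instance

-- ===== CLAIM (what is proved, stated in full; the proofs are below) =====
def Claim_equal_base6_a_base5 : Prop := ∀ (numero : Int), Dom_base6_a_base5 numero → Spec_base6_a_base5 numero (base6_a_base5 numero)

-- ===== LEMMAS AND PROOFS =====

-- reference decode: value of n's decimal digits read in base 6 (LSB recurrence)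
def dec6 (n : Int) : Int :=
  if n > 0 then PySem.Int.mod n 10 + 6 * dec6 (PySem.Int.floordiv n 10) else 0
termination_by n.toNat
decreasing_by
  rw [PySem.Int.floordiv_eq_ediv_of_pos (by norm_num)]
  omega

-- reference encode: decimal numeral whose digits are d's base-5 digits (LSB recurrence)
def enc5 (d : Int) : Int :=
  if d > 0 then PySem.Int.mod d 5 + 10 * enc5 (PySem.Int.floordiv d 5) else 0
termination_by d.toNat
decreasing_by
  rw [PySem.Int.floordiv_eq_ediv_of_pos (by norm_num)]
  omega

theorem aDecode_eq (numero decimal : Int) (exponente : Nat) :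
    aDecode numero decimal exponente = decimal + 6 ^ exponente * dec6 numero := by
  induction numero, decimal, exponente using aDecode.induct with
  | case1 n d e h ih =>
    rw [aDecode, if_pos h, dec6, if_pos h, ih]
    ring
  | case2 n d e h =>
    rw [aDecode, if_neg h, dec6, if_neg h]
    ring

theorem aEncode_eq (decimal binario valor : Int) :
    aEncode decimal binario valor = binario + valor * enc5 decimal := by
  induction decimal, binario, valor using aEncode.induct with
  | case1 d b v h ih =>
    rw [aEncode, if_pos h, enc5, if_pos h, ih]
    ring
  | case2 d b v h =>
    rw [aEncode, if_neg h, enc5, if_neg h]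
    ring

theorem bRebuild_eq (d : Int) : ∀ acc : Int,
    (bDigits d).reverse.foldl (fun r x => r * 10 + x) acc
      = acc * 10 ^ (bDigits d).length + enc5 d := by
  induction d using bDigits.induct with
  | case1 d h ih =>
    intro acc
    rw [bDigits, if_pos h, enc5, if_pos h]
    simp only [List.reverse_cons, List.foldl_append, List.foldl_cons, List.foldl_nil,
      List.length_cons]
    rw [ih]
    ring
  | case2 d h =>
    intro acc
    rw [bDigits, if_neg h, enc5, if_neg h]
    simp

-- MSB-first recursion equivalent to Nat.toDigits' fuelled core (relates toStr to digits)
def digitsRec (m : Nat) : List Char :=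
  if m < 10 then [Nat.digitChar m] else digitsRec (m / 10) ++ [Nat.digitChar (m % 10)]
termination_by m
decreasing_by omega

theorem toDigitsCore_eq (f : Nat) : ∀ (m : Nat) (ds : List Char), m < f →
    Nat.toDigitsCore 10 f m ds = digitsRec m ++ ds := by
  induction f with
  | zero => intro m ds h; omega
  | succ f ih =>
    intro m ds h
    rw [Nat.toDigitsCore]
    by_cases h10 : m / 10 = 0
    · rw [if_pos h10, digitsRec, if_pos (by omega), Nat.mod_eq_of_lt (by omega)]
      simp
    · rw [if_neg h10, digitsRec, if_neg (by omega), ih (m / 10) _ (by omega)]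
      simp

theorem digitChar_toNat (d : Nat) (hd : d < 10) : ((Nat.digitChar d).toNat : Int) = d + 48 := by
  interval_cases d <;> decide

theorem dec6_natCast (m : Nat) :
    dec6 (m : Int) = if 0 < m then ((m % 10 : Nat) : Int) + 6 * dec6 ((m / 10 : Nat) : Int)
      else 0 := by
  have h1 : PySem.Int.mod (m : Int) 10 = ((m % 10 : Nat) : Int) := by
    exact_mod_cast PySem.Int.mod_natCast m 10
  have h2 : PySem.Int.floordiv (m : Int) 10 = ((m / 10 : Nat) : Int) := by
    exact_mod_cast PySem.Int.floordiv_natCast m 10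
  rw [dec6, h1, h2]
  rcases Nat.eq_zero_or_pos m with h0 | h0
  · subst h0; norm_num
  · rw [if_pos (by exact_mod_cast h0), if_pos h0]

theorem dec6_small (m : Nat) (h : m < 10) : dec6 (m : Int) = m := by
  rw [dec6_natCast]
  rcases Nat.eq_zero_or_pos m with h0 | h0
  · simp [h0]
  · rw [if_pos h0, Nat.mod_eq_of_lt h, Nat.div_eq_of_lt h]
    have : dec6 ((0 : Nat) : Int) = 0 := by rw [dec6]; norm_num
    rw [this]
    ring

theorem horner_digitsRec (m : Nat) : ∀ acc : Int,
    (digitsRec m).foldl (fun a c => a * 6 + ((c.toNat : Int) - 48)) acc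
      = acc * 6 ^ (digitsRec m).length + dec6 (m : Int) := by
  induction m using digitsRec.induct with
  | case1 m h =>
    intro acc
    rw [digitsRec, if_pos h]
    simp only [List.foldl_cons, List.foldl_nil, List.length_cons, List.length_nil]
    rw [digitChar_toNat m h, dec6_small m h]
    ring
  | case2 m h ih =>
    intro acc
    rw [digitsRec, if_neg h]
    simp only [List.foldl_append, List.foldl_cons, List.foldl_nil, List.length_append,
      List.length_cons, List.length_nil]
    rw [ih, digitChar_toNat (m % 10) (Nat.mod_lt _ (by norm_num)),
      dec6_natCast m, if_pos (by omega)]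
    ring

-- ===== VERDICT (by name: the statement is the Claim_ definition above) =====
theorem base6_a_base5_spec : Claim_equal_base6_a_base5 := by
  intro numero _
  unfold Spec_base6_a_base5
  simp only [base6_a_base5, base6_a_base5_alt]
  by_cases h : numero ≤ 0
  · rw [if_pos h]
    have hA : aDecode numero 0 0 = 0 := by rw [aDecode, if_neg (by omega)]
    rw [hA, aEncode, if_neg (by norm_num)]
  · rw [if_neg h]
    have hm : numero = (numero.toNat : Int) := by omega
    have hchars : (PySem.Int.toStr numero).toList = digitsRec numero.toNat := by
      rw [PySem.Int.toList_toStr, PySem.Int.toChars, if_neg (by omega), Nat.toDigits,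
        toDigitsCore_eq (numero.toNat + 1) numero.toNat [] (by omega)]
      simp
    rw [aEncode_eq, aDecode_eq, hchars, horner_digitsRec numero.toNat 0,
      bRebuild_eq _ 0, ← hm]
    ring_nf
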